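-- pv_equiv track=rewrite | github.com/lukaskucinski/datasync-plugin | sync_engine.py | get_change_summary
-- ===== SOURCE A (Python) =====
-- ADDED = 'ADDED'
--
-- MODIFIED = 'MODIFIED'
--
-- def get_change_summary(diff_data):
--     """Get summary of changes.
--
--     :param diff_data: Diff data from generate_diff()
--     :return: Dictionary with counts
--     """
--     counts = {
--         'added': 0,
--         'modified': 0,
--         'unchanged': 0
--     }
--
--     for item in diff_data:
--         if item['change_type'] == ADDED:
--             counts['added'] += 1
--         elif item['change_type'] == MODIFIED:
--             counts['modified'] += 1
--         else:
--             counts['unchanged'] += 1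
--
--     return counts
-- ===== SOURCE B (Python) =====
-- def get_change_summary(diff_data):
--     """Get summary of changes.
--
--     :param diff_data: Diff data from generate_diff()
--     :return: Dictionary with counts
--     """
--     freq = {}
--     for item in diff_data:
--         t = item['change_type']
--         freq[t] = freq.get(t, 0) + 1
--     added = freq.get('ADDED', 0)
--     modified = freq.get('MODIFIED', 0)
--     total = sum(freq.values())
--     return {
--         'added': added,
--         'modified': modified,
--         'unchanged': total - added - modified
--     }
-- ===== Notes on version B (the rewrite author's own statement) =====
-- stated objective: idiomatic
-- what changed: B builds one frequency table of the raw change_type values and derives the three counts by lookup, computing 'unchanged' as total (sum of frequencies) minus added minus modified instead of counting it in a three-way branch.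
import Mathlib
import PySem

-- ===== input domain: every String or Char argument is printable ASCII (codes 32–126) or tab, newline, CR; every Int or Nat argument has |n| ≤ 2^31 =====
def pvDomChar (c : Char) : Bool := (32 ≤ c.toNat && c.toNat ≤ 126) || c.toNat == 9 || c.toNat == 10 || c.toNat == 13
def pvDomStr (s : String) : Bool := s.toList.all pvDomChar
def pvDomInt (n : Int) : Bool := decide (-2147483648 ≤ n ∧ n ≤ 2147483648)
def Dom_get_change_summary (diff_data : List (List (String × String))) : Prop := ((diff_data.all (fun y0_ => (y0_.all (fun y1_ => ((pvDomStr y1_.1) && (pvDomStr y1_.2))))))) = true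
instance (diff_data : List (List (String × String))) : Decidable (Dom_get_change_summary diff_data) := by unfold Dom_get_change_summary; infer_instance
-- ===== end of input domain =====

-- B replaces A's three-way counting branch with one frequency table of the raw change_type
-- values, reading 'added'/'modified' by lookup and deriving 'unchanged' as total - added -
-- modified (idiomatic; same order of the result keys, same cost).

-- ===== PORT A =====
def get_change_summary (diff_data : List (List (String × String))) : List (String × Int) :=
  let counts : PySem.Dict String Int :=
    PySem.Dict.ofList [("added", 0), ("modified", 0), ("unchanged", 0)]
  let counts := diff_data.foldl (fun counts item =>
    -- item['change_type'] raises KeyError when absent; Pre_ excludes that, so the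
    -- default "" below is never used on admitted inputs
    let ct := ((PySem.Dict.mk item).get? "change_type").getD ""
    if ct = "ADDED" then counts.modify "added" 0 (· + 1)
    else if ct = "MODIFIED" then counts.modify "modified" 0 (· + 1)
    else counts.modify "unchanged" 0 (· + 1)) counts
  counts.items

-- ===== PORT B =====
def get_change_summary_alt (diff_data : List (List (String × String))) : List (String × Int) :=
  let freq : PySem.Dict String Int := diff_data.foldl (fun freq item =>
    let t := ((PySem.Dict.mk item).get? "change_type").getD ""
    freq.insert t (freq.getD t 0 + 1)) PySem.Dict.empty
  let added := freq.getD "ADDED" 0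
  let modified := freq.getD "MODIFIED" 0
  let total := freq.values.sum
  [("added", added), ("modified", modified), ("unchanged", total - added - modified)]

-- ===== PRECONDITION & SPEC =====
-- Pre_ excludes exactly the inputs where A (and B) raise KeyError: an item without the key 'change_type'.
def Pre_get_change_summary (diff_data : List (List (String × String))) : Prop :=
  ∀ item ∈ diff_data, (PySem.Dict.mk item).contains "change_type" = true
instance (diff_data : List (List (String × String))) : Decidable (Pre_get_change_summary diff_data) := by unfold Pre_get_change_summary; infer_instance

def pvWitness_get_change_summary : (List (List (String × String))) :=
  [[("change_type", "ADDED")], [("change_type", "other"), ("x", "y")]]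

def Spec_get_change_summary (diff_data : List (List (String × String))) (out : List (String × Int)) : Prop := out = get_change_summary_alt diff_data
instance (diff_data : List (List (String × String))) (out : List (String × Int)) : Decidable (Spec_get_change_summary diff_data out) := by unfold Spec_get_change_summary; infer_instance

-- ===== CLAIM (what is proved, stated in full; the proofs are below) =====
def Claim_equal_get_change_summary : Prop := ∀ (diff_data : List (List (String × String))), Dom_get_change_summary diff_data → Pre_get_change_summary diff_data → Spec_get_change_summary diff_data (get_change_summary diff_data)

-- ===== LEMMAS AND PROOFS =====

-- the list of change_type strings both loops read, one per item
def pvCts (diff_data : List (List (String × String))) : List String :=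
  diff_data.map (fun item => ((PySem.Dict.mk item).get? "change_type").getD "")

-- A's loop step, as a function of the change_type string
def pvStepA (d : PySem.Dict String Int) (ct : String) : PySem.Dict String Int :=
  if ct = "ADDED" then d.modify "added" 0 (· + 1)
  else if ct = "MODIFIED" then d.modify "modified" 0 (· + 1)
  else d.modify "unchanged" 0 (· + 1)

lemma pvAddedA (cts : List String) (d : PySem.Dict String Int) :
    (cts.foldl pvStepA d).getD "added" 0 = d.getD "added" 0 + (cts.count "ADDED" : Int) := by
  induction cts generalizing d with
  | nil => simp
  | cons c rest ih =>
    simp only [List.foldl_cons, ih, List.count_cons]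
    unfold pvStepA
    split_ifs <;> simp_all [PySem.Dict.getD_modify] <;> omega

lemma pvModifiedA (cts : List String) (d : PySem.Dict String Int) :
    (cts.foldl pvStepA d).getD "modified" 0 = d.getD "modified" 0 + (cts.count "MODIFIED" : Int) := by
  induction cts generalizing d with
  | nil => simp
  | cons c rest ih =>
    simp only [List.foldl_cons, ih, List.count_cons]
    unfold pvStepA
    split_ifs <;> simp_all [PySem.Dict.getD_modify] <;> omega

lemma pvUnchangedA (cts : List String) (d : PySem.Dict String Int) :
    (cts.foldl pvStepA d).getD "unchanged" 0 =
      d.getD "unchanged" 0 + ((cts.length : Int) - cts.count "ADDED" - cts.count "MODIFIED") := by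
  induction cts generalizing d with
  | nil => simp
  | cons c rest ih =>
    simp only [List.foldl_cons, ih, List.count_cons, List.length_cons]
    unfold pvStepA
    split_ifs <;> simp_all [PySem.Dict.getD_modify] <;> push_cast <;> omega

-- sum of the frequency table's values = number of items counted
lemma pvSumCounter (cts : List String) :
    ((PySem.Dict.counter cts : PySem.Dict String Int).values).sum = (cts.length : Int) := by
  have hv : (PySem.Dict.counter cts : PySem.Dict String Int).values
      = (PySem.Set.ofList cts).map (fun k => (cts.count k : Int)) := by
    show ((PySem.Dict.counter cts : PySem.Dict String Int).items).map (·.2) = _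
    rw [PySem.Dict.items_counter, List.map_map]; rfl
  rw [hv]
  have hperm : List.Perm (PySem.Set.ofList cts : List String) cts.dedup := by
    rw [List.perm_ext_iff_of_nodup (PySem.Set.nodup_ofList cts) cts.nodup_dedup]
    intro a; simp [PySem.Set.mem_ofList, List.mem_dedup]
  rw [List.Perm.sum_eq (hperm.map _)]
  rw [show (fun k => (cts.count k : Int)) = (Nat.cast : ℕ → ℤ) ∘ (fun k => cts.count k) from rfl,
     ← List.map_map, ← Nat.cast_list_sum]
  exact_mod_cast List.sum_map_count_dedup_eq_length cts

-- A's loop never adds a key: the three counter keys persist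
lemma pvKeysA (cts : List String) (d : PySem.Dict String Int)
    (h1 : d.contains "added" = true) (h2 : d.contains "modified" = true)
    (h3 : d.contains "unchanged" = true) :
    (cts.foldl pvStepA d).keys = d.keys := by
  induction cts generalizing d with
  | nil => rfl
  | cons c rest ih =>
    rw [List.foldl_cons]
    by_cases hA : c = "ADDED"
    · rw [show pvStepA d c = d.modify "added" 0 (· + 1) from by simp [pvStepA, hA]]
      rw [ih _ (by simp [PySem.Dict.contains_modify, h1]) (by simp [PySem.Dict.contains_modify, h2])
            (by simp [PySem.Dict.contains_modify, h3])]
      simp [PySem.Dict.keys_insert_of_contains, h1]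
    by_cases hM : c = "MODIFIED"
    · rw [show pvStepA d c = d.modify "modified" 0 (· + 1) from by simp [pvStepA, hA, hM]]
      rw [ih _ (by simp [PySem.Dict.contains_modify, h1]) (by simp [PySem.Dict.contains_modify, h2])
            (by simp [PySem.Dict.contains_modify, h3])]
      simp [PySem.Dict.keys_insert_of_contains, h2]
    · rw [show pvStepA d c = d.modify "unchanged" 0 (· + 1) from by simp [pvStepA, hA, hM]]
      rw [ih _ (by simp [PySem.Dict.contains_modify, h1]) (by simp [PySem.Dict.contains_modify, h2])
            (by simp [PySem.Dict.contains_modify, h3])]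
      simp [PySem.Dict.keys_insert_of_contains, h3]

lemma pvA_char (l : List (List (String × String))) :
    get_change_summary l =
      [("added", ((pvCts l).count "ADDED" : Int)),
       ("modified", ((pvCts l).count "MODIFIED" : Int)),
       ("unchanged", ((pvCts l).length : Int) - (pvCts l).count "ADDED" - (pvCts l).count "MODIFIED")] := by
  show (List.foldl (fun counts item => pvStepA counts (((PySem.Dict.mk item).get? "change_type").getD ""))
          (PySem.Dict.ofList [("added", 0), ("modified", 0), ("unchanged", 0)]) l).items = _
  rw [← List.foldl_map (f := fun item => ((PySem.Dict.mk item).get? "change_type").getD "") (g := pvStepA), ← pvCts]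
  set d0 : PySem.Dict String Int := PySem.Dict.ofList [("added", 0), ("modified", 0), ("unchanged", 0)] with hd0
  have hk : ((pvCts l).foldl pvStepA d0).keys = ["added", "modified", "unchanged"] := by
    rw [pvKeysA _ _ (by decide) (by decide) (by decide)]; decide
  have hnd : ((pvCts l).foldl pvStepA d0).keys.Nodup := by rw [hk]; decide
  rw [PySem.Dict.items_eq_map_keys _ hnd 0, hk]
  simp only [List.map_cons, List.map_nil, pvAddedA, pvModifiedA, pvUnchangedA]
  have e1 : d0.getD "added" 0 = 0 := by decide
  have e2 : d0.getD "modified" 0 = 0 := by decide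
  have e3 : d0.getD "unchanged" 0 = 0 := by decide
  rw [e1, e2, e3]
  norm_num

lemma pvB_char (l : List (List (String × String))) :
    get_change_summary_alt l =
      [("added", ((pvCts l).count "ADDED" : Int)),
       ("modified", ((pvCts l).count "MODIFIED" : Int)),
       ("unchanged", ((pvCts l).length : Int) - (pvCts l).count "ADDED" - (pvCts l).count "MODIFIED")] := by
  show (let freq := List.foldl (fun (freq : PySem.Dict String Int) item =>
          freq.insert (((PySem.Dict.mk item).get? "change_type").getD "")
            (freq.getD (((PySem.Dict.mk item).get? "change_type").getD "") 0 + 1)) PySem.Dict.empty l;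
        [("added", freq.getD "ADDED" 0), ("modified", freq.getD "MODIFIED" 0),
         ("unchanged", freq.values.sum - freq.getD "ADDED" 0 - freq.getD "MODIFIED" 0)]) = _
  have hf : List.foldl (fun (freq : PySem.Dict String Int) item =>
          freq.insert (((PySem.Dict.mk item).get? "change_type").getD "")
            (freq.getD (((PySem.Dict.mk item).get? "change_type").getD "") 0 + 1)) PySem.Dict.empty l
      = PySem.Dict.counter (pvCts l) := by
    rw [← List.foldl_map (f := fun item => ((PySem.Dict.mk item).get? "change_type").getD "")
         (g := fun (d : PySem.Dict String Int) t => d.insert t (d.getD t 0 + 1)), ← pvCts,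
       PySem.Dict.foldl_insert_getD_add_one_eq_counter]
  simp only [hf, PySem.Dict.getD_counter, pvSumCounter]

-- ===== VERDICT (by name: the statement is the Claim_ definition above) =====
theorem get_change_summary_spec : Claim_equal_get_change_summary := by
  intro diff_data _ _
  show get_change_summary diff_data = get_change_summary_alt diff_data
  rw [pvA_char, pvB_char]
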